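-- pv_equiv track=rewrite | github.com/etesongg/CodingTest-Practice | programmers/Lv. 0/1-1주/빈 배열에 추가, 삭제하기.py | solution
-- ===== SOURCE A (Python) =====
-- def solution(arr, flag):
--     answer = []
--     for idx, val in enumerate(arr):
--         if flag[idx] == 1:
--             for i in range(val*2):
--                 answer.append(val)
--         else:
--             for i in range(val):
--                 answer.pop()
--
--     return answer
-- ===== SOURCE B (Python) =====
-- def solution(arr, flag):
--     # Run-length stack: each entry (value, count) stands for `count` copies of
--     # `value`; pops peel/decrement runs instead of removing elements one by one.
--     runs = []
--     for idx, val in enumerate(arr):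
--         if flag[idx] == 1:
--             if val > 0:
--                 runs.append((val, 2 * val))
--         else:
--             need = val
--             while need > 0:
--                 v, c = runs[-1]
--                 if need < c:
--                     runs[-1] = (v, c - need)
--                     need = 0
--                 else:
--                     runs.pop()
--                     need -= c
--     out = []
--     for v, c in runs:
--         out.extend([v] * c)
--     return out
-- ===== Notes on version B (the rewrite author's own statement) =====
-- stated objective: alternative
-- what changed: The flat answer list is replaced by a stack of (value, count) runs: flag==1 pushes one run, pops peel or decrement runs from the top, and the flat list is produced once at the end by expanding the runs.
import Mathlib
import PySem

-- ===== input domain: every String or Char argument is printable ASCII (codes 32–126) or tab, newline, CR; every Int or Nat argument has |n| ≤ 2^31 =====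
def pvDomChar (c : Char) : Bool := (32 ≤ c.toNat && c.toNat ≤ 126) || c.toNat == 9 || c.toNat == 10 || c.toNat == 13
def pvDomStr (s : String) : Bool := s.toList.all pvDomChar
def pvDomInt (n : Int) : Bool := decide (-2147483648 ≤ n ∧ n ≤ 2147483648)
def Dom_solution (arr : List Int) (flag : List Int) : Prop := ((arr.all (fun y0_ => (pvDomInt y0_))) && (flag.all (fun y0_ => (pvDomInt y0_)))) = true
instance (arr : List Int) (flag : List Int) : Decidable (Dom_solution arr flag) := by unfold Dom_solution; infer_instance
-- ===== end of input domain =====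

-- B replaces A's flat answer list by a stack of (value, count) runs, expanded once at the end (alternative decomposition, same outputs).


-- ===== PORT A =====
-- answer.pop() is ported as dropLast; Python raises IndexError there on an empty list, and Pre_solution excludes those inputs.
def solution (arr : List Int) (flag : List Int) : List Int :=
  (PySem.List.enumerate arr 0).foldl
    (fun answer p =>
      if PySem.List.pyGetD flag p.1 0 = 1 then
        (PySem.List.pyRange 0 (p.2 * 2) 1).foldl (fun a _ => a ++ [p.2]) answer
      else
        (PySem.List.pyRange 0 p.2 1).foldl (fun a _ => a.dropLast) answer)
    []

-- ===== PORT B =====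
-- the `while need > 0` loop of Source B: peel/decrement runs from the top (= the list's end)
def popRuns (runs : List (Int × Int)) (need : Int) : List (Int × Int) :=
  if need ≤ 0 then runs
  else
    match h : runs.getLast? with
    | none => []   -- Python raises IndexError here (runs[-1] on empty); outside Pre_solution
    | some (v, c) =>
      if need < c then runs.dropLast ++ [(v, c - need)]
      else popRuns runs.dropLast (need - c)
  termination_by runs.length
  decreasing_by
    have hne : runs ≠ [] := by intro he; subst he; simp at h
    have : 0 < runs.length := List.length_pos_iff.mpr hne
    simp [List.length_dropLast]; omega

def solution_alt (arr : List Int) (flag : List Int) : List Int :=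
  let runs := (PySem.List.enumerate arr 0).foldl
    (fun runs p =>
      if PySem.List.pyGetD flag p.1 0 = 1 then
        if p.2 > 0 then runs ++ [(p.2, 2 * p.2)] else runs
      else popRuns runs p.2)
    []
  runs.foldl (fun out r => out ++ PySem.List.pyRepeat [r.1] r.2) []

-- ===== PRECONDITION & SPEC =====
-- signed length change contributed by step k (flag[s+k]==1 appends 2*max(val,0) copies, else pops max(val,0) elements)
def pvStep (arr flag : List Int) (s k : Nat) : Int :=
  if flag.getD (s + k) 0 = 1 then 2 * max (arr.getD k 0) 0 else -(max (arr.getD k 0) 0)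

-- prefix sum of pvStep: the answer's length just before step k (as long as no earlier step underflowed)
def pvNet (arr flag : List Int) (s : Nat) : Nat → Int
  | 0 => 0
  | k + 1 => pvNet arr flag s k + pvStep arr flag s k

-- Pre_ excludes exactly the inputs where A raises IndexError: arr longer than flag (flag[idx] fails),
-- or some pop step demanding more elements than the answer holds at that point (answer.pop() on empty).
def Pre_solution (arr : List Int) (flag : List Int) : Prop :=
  arr.length ≤ flag.length ∧
    ∀ k : Nat, k < arr.length → flag.getD k 0 ≠ 1 → arr.getD k 0 ≤ pvNet arr flag 0 k

instance (arr : List Int) (flag : List Int) : Decidable (Pre_solution arr flag) := by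
  unfold Pre_solution; infer_instance

def pvWitness_solution : List Int × List Int := ([2, 1], [1, 0])

def Spec_solution (arr : List Int) (flag : List Int) (out : List Int) : Prop := out = solution_alt arr flag
instance (arr : List Int) (flag : List Int) (out : List Int) : Decidable (Spec_solution arr flag out) := by unfold Spec_solution; infer_instance

-- ===== CLAIM (what is proved, stated in full; the proofs are below) =====
def Claim_equal_solution : Prop := ∀ (arr : List Int) (flag : List Int), Dom_solution arr flag → Pre_solution arr flag → Spec_solution arr flag (solution arr flag)

-- ===== LEMMAS AND PROOFS =====

-- the flat list a run stack denotes
def expandRuns (runs : List (Int × Int)) : List Int :=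
  runs.flatMap (fun r => List.replicate r.2.toNat r.1)

theorem expandRuns_concat (ts : List (Int × Int)) (v c : Int) :
    expandRuns (ts ++ [(v, c)]) = expandRuns ts ++ List.replicate c.toNat v := by
  simp [expandRuns]

theorem popRuns_spec (runs : List (Int × Int)) (need : Int)
    (hpos : ∀ r ∈ runs, 0 < r.2)
    (hle : need.toNat ≤ (expandRuns runs).length) :
    expandRuns (popRuns runs need)
      = (expandRuns runs).take ((expandRuns runs).length - need.toNat)
      ∧ ∀ r ∈ popRuns runs need, 0 < r.2 := by
  fun_induction popRuns runs need with
  | case1 runs need hneed =>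
    have h0 : need.toNat = 0 := by omega
    simp only [h0, Nat.sub_zero, List.take_length]
    exact ⟨trivial, hpos⟩
  | case2 runs need hneed h =>
    have : runs = [] := List.getLast?_eq_none_iff.mp h
    subst this
    simp [expandRuns]
  | case3 runs need hneed v c h hlt =>
    obtain ⟨ts, rfl⟩ := List.getLast?_eq_some_iff.mp h
    have hc : 0 < c := hpos (v, c) (by simp)
    have hn : need.toNat < c.toNat := by omega
    rw [List.dropLast_concat]
    refine ⟨?_, ?_⟩
    · rw [expandRuns_concat, expandRuns_concat, List.length_append, List.length_replicate,
        List.take_append, List.take_of_length_le (by omega), List.take_replicate]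
      congr 2
      omega
    · intro r hr
      rcases List.mem_append.mp hr with hr | hr
      · exact hpos r (List.mem_append.mpr (Or.inl hr))
      · simp at hr; subst hr; simpa using (by omega : (0:Int) < c - need)
  | case4 runs need hneed v c h hge ih =>
    obtain ⟨ts, rfl⟩ := List.getLast?_eq_some_iff.mp h
    have hc : 0 < c := hpos (v, c) (by simp)
    rw [List.dropLast_concat] at *
    have hposts : ∀ r ∈ ts, 0 < r.2 := fun r hr => hpos r (List.mem_append.mpr (Or.inl hr))
    have hlen : (expandRuns (ts ++ [(v, c)])).length = (expandRuns ts).length + c.toNat := by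
      rw [expandRuns_concat]; simp
    have hle' : (need - c).toNat ≤ (expandRuns ts).length := by omega
    obtain ⟨ih1, ih2⟩ := ih hposts hle'
    refine ⟨?_, ih2⟩
    rw [ih1, expandRuns_concat, List.take_append, List.take_replicate]
    simp only [List.length_append, List.length_replicate]
    rw [show min ((expandRuns ts).length + c.toNat - need.toNat - (expandRuns ts).length) c.toNat = 0 by omega]
    simp only [List.replicate_zero, List.append_nil]
    congr 1
    omega

theorem pvStep_cons (v : Int) (t flag : List Int) (s k : Nat) :
    pvStep (v :: t) flag s (k + 1) = pvStep t flag (s + 1) k := by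
  unfold pvStep
  rw [List.getD_cons_succ, show s + (k + 1) = s + 1 + k by omega]

theorem pvNet_cons (v : Int) (t flag : List Int) (s : Nat) (k : Nat) :
    pvNet (v :: t) flag s (k + 1) = pvStep (v :: t) flag s 0 + pvNet t flag (s + 1) k := by
  induction k with
  | zero => simp [pvNet]
  | succ k ih =>
    show pvNet (v :: t) flag s (k + 1) + pvStep (v :: t) flag s (k + 1) = _
    rw [ih, pvStep_cons]
    show _ = pvStep (v :: t) flag s 0 + (pvNet t flag (s + 1) k + pvStep t flag (s + 1) k)
    ring

-- A's inner append loop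
theorem appendLoop (l : List Int) (ans : List Int) (v : Int) :
    l.foldl (fun a _ => a ++ [v]) ans = ans ++ List.replicate l.length v := by
  induction l generalizing ans with
  | nil => simp
  | cons x t ih => simp [List.foldl_cons, ih, List.replicate_succ]

-- A's inner pop loop
theorem popLoop (l : List Int) (ans : List Int) :
    l.foldl (fun a _ => a.dropLast) ans = ans.take (ans.length - l.length) := by
  induction l generalizing ans with
  | nil => simp
  | cons x t ih =>
    rw [List.foldl_cons, ih, List.dropLast_eq_take, List.take_take]
    simp only [List.length_take, List.length_cons]
    congr 1
    omega

theorem mainLoop (flag : List Int) (arr : List Int) (s : Nat) (runs : List (Int × Int))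
    (hpos : ∀ r ∈ runs, 0 < r.2)
    (hsafe : ∀ k : Nat, k < arr.length → flag.getD (s + k) 0 ≠ 1 →
        arr.getD k 0 ≤ ((expandRuns runs).length : Int) + pvNet arr flag s k) :
    (PySem.List.enumerate arr (s : Int)).foldl
        (fun answer p =>
          if PySem.List.pyGetD flag p.1 0 = 1 then
            (PySem.List.pyRange 0 (p.2 * 2) 1).foldl (fun a _ => a ++ [p.2]) answer
          else
            (PySem.List.pyRange 0 p.2 1).foldl (fun a _ => a.dropLast) answer)
        (expandRuns runs)
      = expandRuns ((PySem.List.enumerate arr (s : Int)).foldl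
          (fun runs p =>
            if PySem.List.pyGetD flag p.1 0 = 1 then
              if p.2 > 0 then runs ++ [(p.2, 2 * p.2)] else runs
            else popRuns runs p.2)
          runs) := by
  induction arr generalizing s runs with
  | nil => simp [PySem.List.enumerate]
  | cons v t ih =>
    rw [PySem.List.enumerate_cons]
    simp only [List.foldl_cons, PySem.List.pyGetD_natCast]
    have hcast : ((s : Int) + 1) = ((s + 1 : Nat) : Int) := by push_cast; ring
    rw [hcast]
    by_cases hc : flag.getD s 0 = 1
    · rw [if_pos hc, if_pos hc, appendLoop,
        show (PySem.List.pyRange 0 (v * 2) 1).length = (v * 2).toNat by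
          rw [PySem.List.length_pyRange_one]; norm_num]
      by_cases hv : v > 0
      · rw [if_pos hv]
        rw [show expandRuns runs ++ List.replicate (v * 2).toNat v
              = expandRuns (runs ++ [(v, 2 * v)]) by
          rw [expandRuns_concat, Int.mul_comm]]
        apply ih (s + 1)
        · intro r hr
          rcases List.mem_append.mp hr with hr | hr
          · exact hpos r hr
          · simp at hr; subst hr; simpa using (by omega : (0:Int) < 2 * v)
        · intro k hk hf
          have h1 := hsafe (k + 1) (by simpa using Nat.succ_lt_succ hk)
            (by rw [show s + (k + 1) = s + 1 + k by omega]; exact hf)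
          rw [pvNet_cons] at h1
          simp only [List.getD_cons_succ] at h1
          have h2 : pvStep (v :: t) flag s 0 = 2 * max v 0 := by
            simp only [pvStep, Nat.add_zero, List.getD_cons_zero]
            rw [if_pos hc]
          have h3 : (expandRuns (runs ++ [(v, 2 * v)])).length
              = (expandRuns runs).length + (2 * v).toNat := by
            rw [expandRuns_concat]; simp
          rw [h3]
          rw [h2] at h1
          push_cast
          omega
      · rw [if_neg hv]
        rw [show (v * 2).toNat = 0 by omega]
        simp only [List.replicate_zero, List.append_nil]
        apply ih (s + 1) runs hpos
        intro k hk hf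
        have h1 := hsafe (k + 1) (by simpa using Nat.succ_lt_succ hk)
          (by rw [show s + (k + 1) = s + 1 + k by omega]; exact hf)
        rw [pvNet_cons] at h1
        simp only [List.getD_cons_succ] at h1
        have h2 : pvStep (v :: t) flag s 0 = 2 * max v 0 := by
          simp only [pvStep, Nat.add_zero, List.getD_cons_zero]
          rw [if_pos hc]
        rw [h2] at h1
        omega
    · rw [if_neg hc, if_neg hc, popLoop,
        show (PySem.List.pyRange 0 v 1).length = v.toNat by
          rw [PySem.List.length_pyRange_one]; norm_num]
      have hv0 : v ≤ ((expandRuns runs).length : Int) := by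
        have := hsafe 0 (by simp) (by simpa using hc)
        simpa [pvNet] using this
      have hvle : v.toNat ≤ (expandRuns runs).length := by omega
      obtain ⟨he, hp⟩ := popRuns_spec runs v hpos hvle
      rw [← he]
      have hlen : (expandRuns (popRuns runs v)).length
          = (expandRuns runs).length - v.toNat := by
        rw [he, List.length_take]; omega
      apply ih (s + 1) _ hp
      intro k hk hf
      have h1 := hsafe (k + 1) (by simpa using Nat.succ_lt_succ hk)
        (by rw [show s + (k + 1) = s + 1 + k by omega]; exact hf)
      rw [pvNet_cons] at h1
      simp only [List.getD_cons_succ] at h1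
      have h2 : pvStep (v :: t) flag s 0 = -(max v 0) := by
        simp only [pvStep, Nat.add_zero, List.getD_cons_zero]
        rw [if_neg hc]
      rw [h2] at h1
      rw [hlen]
      omega

-- ===== VERDICT (by name: the statement is the Claim_ definition above) =====
theorem solution_spec : Claim_equal_solution := by
  intro arr flag _hdom hpre
  unfold Spec_solution solution solution_alt
  have h := mainLoop flag arr 0 [] (by simp) (by
    intro k hk hf
    have := hpre.2 k hk (by simpa using hf)
    simpa [expandRuns] using this)
  simp only [Nat.cast_zero] at h
  rw [show (expandRuns []) = ([] : List Int) by simp [expandRuns]] at h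
  rw [h]
  rw [PySem.List.foldl_append_eq_flatMap]
  simp [expandRuns, PySem.List.pyRepeat_singleton]
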